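-- pv_equiv track=rewrite | github.com/camilbancioiu/mbtk | mbff/math/DoFCalculators.py | calculate_pairwise_DoFs
-- ===== SOURCE A (Python) =====
-- import collections
--
-- def calculate_pairwise_DoFs(pmf, keysize):
--     pairwise_dofs = dict()
--
--     for ix in range(keysize):
--         for iy in range(ix + 1, keysize):
--
--             x_values_per_z = collections.defaultdict(set)
--             y_values_per_z = collections.defaultdict(set)
--             zs = set()
--             for key in pmf.keys():
--                 x = key[ix]
--                 y = key[iy]
--                 z = tuple(key[iz] for iz in range(keysize) if iz != ix and iz != iy)
--                 x_values_per_z[z].add(x)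
--                 y_values_per_z[z].add(y)
--                 zs.add(z)
--
--             DoF = 0
--             for z in zs:
--                 X_val = len(x_values_per_z[z])
--                 Y_val = len(y_values_per_z[z])
--                 DoF += (X_val - 1) * (Y_val - 1)
--
--             if DoF == 0:
--                 DoF = 1
--             pairwise_dofs[(ix, iy)] = pairwise_dofs[(iy, ix)] = DoF
--
--     return pairwise_dofs
-- ===== SOURCE B (Python) =====
-- import collections
--
-- def calculate_pairwise_DoFs(pmf, keysize):
--     # Counting formula instead of per-z grouping of value sets: for each pair,
--     # DoF = sum_z |X_z||Y_z| - |S_x| - |S_y| + |S_z|, read off three projection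
--     # sets and two Counters (|X_z| = multiplicity of z among the x-keeping
--     # projections), using that sum_z |X_z| = |S_x| and sum_z 1 = |S_z|.
--     projs = {tuple(key[:keysize]) for key in pmf.keys()}
--     result = {}
--     for ix in range(keysize):
--         for iy in range(ix + 1, keysize):
--             sx = {t[:iy] + t[iy + 1:] for t in projs}
--             sy = {t[:ix] + t[ix + 1:] for t in projs}
--             sz = {u[:ix] + u[ix + 1:] for u in sx}
--             cx = collections.Counter(u[:ix] + u[ix + 1:] for u in sx)
--             cy = collections.Counter(v[:iy - 1] + v[iy:] for v in sy)
--             dof = sum(cx[z] * cy[z] for z in sz) - len(sx) - len(sy) + len(sz)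
--             if dof == 0:
--                 dof = 1
--             result[(ix, iy)] = result[(iy, ix)] = dof
--     return result
-- ===== Notes on version B (the rewrite author's own statement) =====
-- stated objective: alternative
-- what changed: B drops A's per-z grouping of (x,y) value-sets entirely: it builds deduplicated projection sets Sx, Sy, Sz of the truncated keys plus two Counters of z-multiplicities and reads each pair's DoF off the identity DoF = sum_z |X_z||Y_z| - |Sx| - |Sy| + |Sz|.
import Mathlib
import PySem

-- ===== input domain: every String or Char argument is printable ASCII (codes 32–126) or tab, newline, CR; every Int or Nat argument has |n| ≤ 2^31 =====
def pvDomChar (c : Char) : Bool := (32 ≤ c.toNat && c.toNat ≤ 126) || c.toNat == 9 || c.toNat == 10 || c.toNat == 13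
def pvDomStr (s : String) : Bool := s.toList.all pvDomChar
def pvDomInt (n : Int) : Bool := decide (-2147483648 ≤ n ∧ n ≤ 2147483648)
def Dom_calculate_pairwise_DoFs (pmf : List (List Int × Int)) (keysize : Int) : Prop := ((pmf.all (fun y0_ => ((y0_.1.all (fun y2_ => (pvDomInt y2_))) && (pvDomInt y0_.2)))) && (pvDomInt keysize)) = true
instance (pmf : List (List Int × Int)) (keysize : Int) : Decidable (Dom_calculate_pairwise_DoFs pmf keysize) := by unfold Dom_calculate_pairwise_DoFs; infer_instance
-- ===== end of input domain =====

-- B replaces A's per-z grouping of (x,y)-value sets by a counting formula over projection sets: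
-- DoF = Σ_z |X_z||Y_z| − |Sx| − |Sy| + |Sz|, read off three deduplicated projections and two
-- Counters; same return value on every input A accepts (Pre_ excludes only A's IndexError inputs).

-- ===== PORT A =====
-- pmf.keys() (pmf is the association list of a Python dict; keys = first occurrences)
def pvKeys (pmf : List (List Int × Int)) : List (List Int) :=
  (PySem.Dict.ofList pmf).keys

-- z = tuple(key[iz] for iz in range(keysize) if iz != ix and iz != iy)
def pvFilterZ (key : List Int) (keysize ix iy : Int) : List Int :=
  ((PySem.List.pyRange 0 keysize 1).filter (fun iz => !(iz == ix) && !(iz == iy))).map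
    (fun iz => PySem.List.pyGetD key iz 0)

-- (x_values_per_z, y_values_per_z, zs)
abbrev PvStA := PySem.Dict (List Int) (PySem.Set Int) × PySem.Dict (List Int) (PySem.Set Int) × PySem.Set (List Int)

-- body of A's 'for key in pmf.keys():' loop
def pvStepA (keysize ix iy : Int) (st : PvStA) (key : List Int) : PvStA :=
  let x := PySem.List.pyGetD key ix 0
  let y := PySem.List.pyGetD key iy 0
  let z := pvFilterZ key keysize ix iy
  (st.1.modify z PySem.Set.empty (fun s => PySem.Set.add s x),
   st.2.1.modify z PySem.Set.empty (fun s => PySem.Set.add s y),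
   PySem.Set.add st.2.2 z)

-- the per-pair body: scan of pmf.keys(), then the DoF accumulation over zs
def pvDofA (pmf : List (List Int × Int)) (keysize ix iy : Int) : Int :=
  let st := (pvKeys pmf).foldl (pvStepA keysize ix iy)
    (PySem.Dict.empty, PySem.Dict.empty, PySem.Set.empty)
  st.2.2.foldl (fun dof z =>
    dof + (((st.1.getD z PySem.Set.empty).length : Int) - 1)
        * (((st.2.1.getD z PySem.Set.empty).length : Int) - 1)) 0

def calculate_pairwise_DoFs (pmf : List (List Int × Int)) (keysize : Int) : List (List Int × Int) :=
  ((PySem.List.pyRange 0 keysize 1).foldl (fun pd ix =>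
    (PySem.List.pyRange (ix + 1) keysize 1).foldl (fun pd iy =>
      let dof := pvDofA pmf keysize ix iy
      let dof := if dof = 0 then 1 else dof
      (pd.insert [ix, iy] dof).insert [iy, ix] dof) pd)
    PySem.Dict.empty).items

-- ===== PORT B =====
-- t[:i] + t[i+1:]  (drop the i-th coordinate)
def pvCut (i : Int) (t : List Int) : List Int :=
  PySem.List.slice t none (some i) ++ PySem.List.slice t (some (i + 1)) none

-- the per-pair body of B: projection sets, two Counters, the counting formula
def pvDofB (projs : PySem.Set (List Int)) (ix iy : Int) : Int :=
  let sx := PySem.Set.ofList (projs.map (pvCut iy))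
  let sy := PySem.Set.ofList (projs.map (pvCut ix))
  let sz := PySem.Set.ofList (sx.map (pvCut ix))
  let cx := PySem.Dict.counter (sx.map (pvCut ix))
  let cy := PySem.Dict.counter (sy.map (pvCut (iy - 1)))
  sz.foldl (fun s z => s + cx.getD z 0 * cy.getD z 0) 0
    - (sx.length : Int) - (sy.length : Int) + (sz.length : Int)

def calculate_pairwise_DoFs_alt (pmf : List (List Int × Int)) (keysize : Int) : List (List Int × Int) :=
  let projs := PySem.Set.ofList ((pvKeys pmf).map (fun key => PySem.List.slice key none (some keysize)))
  ((PySem.List.pyRange 0 keysize 1).foldl (fun pd ix =>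
    (PySem.List.pyRange (ix + 1) keysize 1).foldl (fun pd iy =>
      let dof := pvDofB projs ix iy
      let dof := if dof = 0 then 1 else dof
      (pd.insert [ix, iy] dof).insert [iy, ix] dof) pd)
    PySem.Dict.empty).items

-- ===== PRECONDITION & SPEC =====
-- A raises IndexError (key[ix]) iff it reaches some pair (keysize ≥ 2) and some key of pmf is
-- shorter than keysize; Pre_ excludes exactly those inputs.
def Pre_calculate_pairwise_DoFs (pmf : List (List Int × Int)) (keysize : Int) : Prop :=
  2 ≤ keysize → ∀ kv ∈ pmf, keysize ≤ (kv.1.length : Int)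
instance (pmf : List (List Int × Int)) (keysize : Int) : Decidable (Pre_calculate_pairwise_DoFs pmf keysize) := by unfold Pre_calculate_pairwise_DoFs; infer_instance

def pvWitness_calculate_pairwise_DoFs : (List (List Int × Int)) × Int :=
  ([([0, 1, 0], 3), ([1, 1, 0], 2), ([0, 0, 1], 1)], 3)

def Spec_calculate_pairwise_DoFs (pmf : List (List Int × Int)) (keysize : Int) (out : List (List Int × Int)) : Prop := out = calculate_pairwise_DoFs_alt pmf keysize
instance (pmf : List (List Int × Int)) (keysize : Int) (out : List (List Int × Int)) : Decidable (Spec_calculate_pairwise_DoFs pmf keysize out) := by unfold Spec_calculate_pairwise_DoFs; infer_instance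

-- ===== CLAIM (what is proved, stated in full; the proofs are below) =====
def Claim_equal_calculate_pairwise_DoFs : Prop := ∀ (pmf : List (List Int × Int)) (keysize : Int), Dom_calculate_pairwise_DoFs pmf keysize → Pre_calculate_pairwise_DoFs pmf keysize → Spec_calculate_pairwise_DoFs pmf keysize (calculate_pairwise_DoFs pmf keysize)
-- ===== LEMMAS AND PROOFS =====

-- drop the i-th coordinate / re-insert a coordinate at position i (nat forms of B's slices)
def pvDropAt (i : Nat) (u : List Int) : List Int := u.take i ++ u.drop (i + 1)
def pvIns (i : Nat) (z : List Int) (x : Int) : List Int := z.take i ++ x :: z.drop i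

theorem pv_cut_natCast (i : Nat) (t : List Int) : pvCut (i : Int) t = pvDropAt i t := by
  rw [pvCut, pvDropAt, PySem.List.slice_to_natCast,
    show ((i : Int) + 1) = ((i + 1 : Nat) : Int) by push_cast; ring,
    PySem.List.slice_from_natCast]

-- ---- A-side fold characterizations ----
theorem pvA_zs (n a b : Int) : ∀ (keys : List (List Int)) (st : PvStA),
    (keys.foldl (pvStepA n a b) st).2.2
      = keys.foldl (fun s k => PySem.Set.add s (pvFilterZ k n a b)) st.2.2 := by
  intro keys
  induction keys with
  | nil => intro st; rfl
  | cons k keys ih => intro st; rw [List.foldl_cons, List.foldl_cons, ih]; rfl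

theorem pvA_xd (n a b : Int) (z : List Int) : ∀ (keys : List (List Int)) (st : PvStA),
    ((keys.foldl (pvStepA n a b) st).1).getD z PySem.Set.empty
      = ((keys.filter (fun k => pvFilterZ k n a b == z)).map
          (fun k => PySem.List.pyGetD k a 0)).foldl PySem.Set.add (st.1.getD z PySem.Set.empty) := by
  intro keys
  induction keys with
  | nil => intro st; rfl
  | cons k keys ih =>
    intro st
    rw [List.foldl_cons, ih]
    by_cases h : pvFilterZ k n a b = z
    · rw [List.filter_cons_of_pos (by simpa using h), List.map_cons, List.foldl_cons]
      congr 1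
      show (st.1.modify (pvFilterZ k n a b) PySem.Set.empty _).getD z PySem.Set.empty = _
      rw [h, PySem.Dict.getD_modify_self]
    · rw [List.filter_cons_of_neg (by simpa using h)]
      congr 1
      show (st.1.modify (pvFilterZ k n a b) PySem.Set.empty _).getD z PySem.Set.empty = _
      exact PySem.Dict.getD_modify_of_ne _ _ _ (fun hz => h hz.symm)

theorem pvA_yd (n a b : Int) (z : List Int) : ∀ (keys : List (List Int)) (st : PvStA),
    ((keys.foldl (pvStepA n a b) st).2.1).getD z PySem.Set.empty
      = ((keys.filter (fun k => pvFilterZ k n a b == z)).map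
          (fun k => PySem.List.pyGetD k b 0)).foldl PySem.Set.add (st.2.1.getD z PySem.Set.empty) := by
  intro keys
  induction keys with
  | nil => intro st; rfl
  | cons k keys ih =>
    intro st
    rw [List.foldl_cons, ih]
    by_cases h : pvFilterZ k n a b = z
    · rw [List.filter_cons_of_pos (by simpa using h), List.map_cons, List.foldl_cons]
      congr 1
      show (st.2.1.modify (pvFilterZ k n a b) PySem.Set.empty _).getD z PySem.Set.empty = _
      rw [h, PySem.Dict.getD_modify_self]
    · rw [List.filter_cons_of_neg (by simpa using h)]
      congr 1
      show (st.2.1.modify (pvFilterZ k n a b) PySem.Set.empty _).getD z PySem.Set.empty = _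
      exact PySem.Dict.getD_modify_of_ne _ _ _ (fun hz => h hz.symm)

theorem pv_dofA_char (pmf : List (List Int × Int)) (n a b : Int) :
    pvDofA pmf n a b
      = (PySem.Set.ofList ((pvKeys pmf).map (fun k => pvFilterZ k n a b))).foldl
          (fun dof z => dof
            + (((PySem.Set.ofList (((pvKeys pmf).filter (fun k => pvFilterZ k n a b == z)).map
                  (fun k => PySem.List.pyGetD k a 0))).length : Int) - 1)
            * (((PySem.Set.ofList (((pvKeys pmf).filter (fun k => pvFilterZ k n a b == z)).map
                  (fun k => PySem.List.pyGetD k b 0))).length : Int) - 1)) 0 := by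
  have hz : ((pvKeys pmf).foldl (pvStepA n a b)
      (PySem.Dict.empty, PySem.Dict.empty, PySem.Set.empty)).2.2
      = PySem.Set.ofList ((pvKeys pmf).map (fun k => pvFilterZ k n a b)) := by
    rw [pvA_zs, PySem.Set.ofList_eq_foldl, List.foldl_map]; rfl
  simp only [pvDofA, hz, pvA_xd, pvA_yd]
  apply PySem.List.foldl_congr_mem
  intro acc z _
  simp only [PySem.Set.ofList_eq_foldl, List.foldl_map, PySem.Dict.getD_empty]
  rfl

-- ---- list/Finset bridges ----
theorem pv_toFinset_ofList {α : Type} [DecidableEq α] [BEq α] [LawfulBEq α] (l : List α) :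
    (PySem.Set.ofList l).toFinset = l.toFinset := by
  ext x; simp [PySem.Set.mem_ofList]

theorem pv_nodup_ofList {α : Type} [BEq α] [LawfulBEq α] (l : List α) :
    (PySem.Set.ofList l).Nodup := PySem.Set.nodup_ofList l

theorem pv_len_ofList {α : Type} [DecidableEq α] [BEq α] [LawfulBEq α] (l : List α) :
    ((PySem.Set.ofList l).length : Int) = (l.toFinset.card : Int) := by
  rw [← pv_toFinset_ofList l, List.card_toFinset,
    List.dedup_eq_self.mpr (pv_nodup_ofList l)]

theorem pv_foldl_sum {α : Type} [DecidableEq α] (L : List α) (hnd : L.Nodup) (φ : α → Int) :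
    L.foldl (fun s z => s + φ z) 0 = ∑ z ∈ L.toFinset, φ z := by
  rw [PySem.List.foldl_add, List.sum_toFinset φ hnd, zero_add]

theorem pv_toFinset_map (l : List (List Int)) (f : List Int → List Int) :
    (l.map f).toFinset = l.toFinset.image f := by
  ext x; simp

theorem pv_count_card (sx : List (List Int)) (hnd : sx.Nodup) (g : List Int → List Int) (z : List Int) :
    ((sx.map g).count z : Int) = ((sx.toFinset.filter (fun u => g u = z)).card : Int) := by
  have h1 : (sx.map g).count z = sx.countP (fun u => g u == z) := List.countP_map
  rw [h1, List.countP_eq_length_filter, ← List.toFinset_card_of_nodup (hnd.filter _)]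
  congr 2
  ext x
  simp

theorem pv_card_image_proj (S : Finset (List Int)) (φ : List Int → List Int) (ψ : List Int → Int)
    (i : Nat) (z : List Int)
    (h1 : ∀ k ∈ S, (φ k).getD i 0 = ψ k)
    (h2 : ∀ k ∈ S, pvIns i z (ψ k) = φ k) :
    (S.image φ).card = (S.image ψ).card := by
  apply le_antisymm
  · have h : S.image φ = (S.image ψ).image (pvIns i z) := by
      rw [Finset.image_image]
      exact Finset.image_congr (fun k hk => (h2 k (by simpa using hk)).symm)
    rw [h]; exact Finset.card_image_le
  · have h : S.image ψ = (S.image φ).image (fun u => u.getD i 0) := by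
      rw [Finset.image_image]
      exact Finset.image_congr (fun k hk => (h1 k (by simpa using hk)).symm)
    rw [h]; exact Finset.card_image_le

-- ---- take/drop identities for the projections ----
theorem pv_mapseg (key : List Int) :
    ∀ (l s : Nat), s + l ≤ key.length →
      (List.range' s l).map (fun k => key.getD k 0) = (key.drop s).take l := by
  intro l
  induction l with
  | zero => intro s _; simp
  | succ l ih =>
    intro s h
    have h1 : s < key.length := by omega
    rw [List.range'_succ, List.map_cons, ih (s + 1) (by omega),
      List.drop_eq_getElem_cons h1, List.take_succ_cons,
      List.getD_eq_getElem _ _ h1]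

-- pvFilterZ in take/drop normal form
theorem pv_zp_normal (key : List Int) (a b n : Nat) (hab : a < b) (hbn : b < n)
    (hk : n ≤ key.length) :
    pvFilterZ key (n : Int) (a : Int) (b : Int)
      = key.take a ++ (key.drop (a + 1)).take (b - (a + 1))
          ++ (key.drop (b + 1)).take (n - (b + 1)) := by
  obtain ⟨m1, hm1⟩ : ∃ m1, b = a + 1 + m1 := ⟨b - (a + 1), by omega⟩
  obtain ⟨m2, hm2⟩ : ∃ m2, n = b + 1 + m2 := ⟨n - (b + 1), by omega⟩
  have hsplit : List.range n
      = List.range' 0 a ++ [a] ++ List.range' (a + 1) m1 ++ [b] ++ List.range' (b + 1) m2 := by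
    rw [List.range_eq_range', show n = a + (1 + (m1 + (1 + m2))) by omega,
      ← List.range'_append (s := 0) (m := a) (n := 1 + (m1 + (1 + m2))) (step := 1),
      show 0 + 1 * a = a by omega,
      ← List.range'_append (s := a) (m := 1) (n := m1 + (1 + m2)) (step := 1),
      show a + 1 * 1 = a + 1 by omega,
      ← List.range'_append (s := a + 1) (m := m1) (n := 1 + m2) (step := 1),
      show a + 1 + 1 * m1 = b by omega,
      ← List.range'_append (s := b) (m := 1) (n := m2) (step := 1),
      show b + 1 * 1 = b + 1 by omega]
    simp [List.append_assoc]
  rw [pvFilterZ, PySem.List.pyRange_zero_natCast, List.filter_map, List.map_map, hsplit]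
  simp only [List.filter_append, List.map_append]
  have hkeep : ∀ (s l : Nat), (∀ k ∈ List.range' s l, k ≠ a ∧ k ≠ b) →
      List.filter ((fun iz => !(iz == (a : Int)) && !(iz == (b : Int))) ∘ fun k => ((k : Nat) : Int))
        (List.range' s l) = List.range' s l := by
    intro s l h
    apply List.filter_eq_self.mpr
    intro k hk
    obtain ⟨hka, hkb⟩ := h k hk
    simp [Function.comp, hka, hkb]
  rw [hkeep 0 a (by intro k hk; have := List.mem_range'_1.mp hk; omega),
    hkeep (a + 1) m1 (by intro k hk; have := List.mem_range'_1.mp hk; omega),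
    hkeep (b + 1) m2 (by intro k hk; have := List.mem_range'_1.mp hk; omega)]
  rw [show List.filter ((fun iz => !(iz == (a : Int)) && !(iz == (b : Int))) ∘ fun k => ((k : Nat) : Int)) [a] = [] by simp,
    show List.filter ((fun iz => !(iz == (a : Int)) && !(iz == (b : Int))) ∘ fun k => ((k : Nat) : Int)) [b] = [] by
      simp [Function.comp]]
  simp only [List.map_nil, List.append_nil]
  rw [show ((fun iz => PySem.List.pyGetD key iz 0) ∘ fun k => ((k : Nat) : Int)) = fun k : Nat => key.getD k 0 by
    funext k; exact PySem.List.pyGetD_natCast key k 0]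
  rw [pv_mapseg key a 0 (by omega), pv_mapseg key m1 (a + 1) (by omega),
    pv_mapseg key m2 (b + 1) (by omega)]
  rw [show b - (a + 1) = m1 by omega, show n - (b + 1) = m2 by omega, List.drop_zero]

theorem pv_dropAt_take (i n : Nat) (k : List Int) (hin : i < n) (_hn : n ≤ k.length) :
    pvDropAt i (k.take n) = k.take i ++ (k.drop (i + 1)).take (n - (i + 1)) := by
  rw [pvDropAt, List.take_take, min_eq_left (by omega), List.drop_take]

theorem pv_len_dropAt (i : Nat) (u : List Int) (h : i < u.length) :
    (pvDropAt i u).length = u.length - 1 := by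
  simp [pvDropAt]; omega

theorem pv_E2 (a b n : Nat) (k : List Int) (hab : a < b) (hbn : b < n) (hn : n ≤ k.length) :
    pvDropAt a (pvDropAt b (k.take n)) = pvFilterZ k (n : Int) (a : Int) (b : Int) := by
  rw [pv_zp_normal k a b n hab hbn hn, pv_dropAt_take b n k hbn hn, pvDropAt,
    List.take_append, List.drop_append]
  have hlb : (k.take b).length = b := List.length_take_of_le (by omega)
  rw [hlb, show a - b = 0 by omega, show a + 1 - b = 0 by omega, List.take_zero, List.drop_zero,
    List.append_nil, List.take_take, min_eq_left (by omega), List.drop_take, List.append_assoc]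

theorem pv_E4 (a b n : Nat) (k : List Int) (hab : a < b) (hbn : b < n) (hn : n ≤ k.length) :
    pvDropAt (b - 1) (pvDropAt a (k.take n)) = pvFilterZ k (n : Int) (a : Int) (b : Int) := by
  have hXlen : (k.take a).length = a := List.length_take_of_le (by omega)
  have hA : (k.take a ++ (k.drop (a + 1)).take (n - (a + 1))).take (b - 1)
      = k.take a ++ (k.drop (a + 1)).take (b - (a + 1)) := by
    rw [List.take_append, hXlen, List.take_of_length_le (by omega), List.take_take]
    congr 2
    omega
  have hB : (k.take a ++ (k.drop (a + 1)).take (n - (a + 1))).drop (b - 1 + 1)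
      = (k.drop (b + 1)).take (n - (b + 1)) := by
    rw [List.drop_append, hXlen, List.drop_eq_nil_of_le (by rw [hXlen]; omega), List.nil_append,
      List.drop_take, List.drop_drop,
      show a + 1 + (b - 1 + 1 - a) = b + 1 by omega,
      show n - (a + 1) - (b - 1 + 1 - a) = n - (b + 1) by omega]
  rw [pv_dropAt_take a n k (by omega) hn, pvDropAt, hA, hB,
    pv_zp_normal k a b n hab hbn hn, List.append_assoc]
theorem pv_E5 (a b n : Nat) (k : List Int) (hab : a < b) (hbn : b < n) (hn : n ≤ k.length) :
    (pvDropAt b (k.take n)).getD a 0 = PySem.List.pyGetD k (a : Int) 0 := by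
  rw [PySem.List.pyGetD_natCast, pv_dropAt_take b n k hbn hn]
  have hlb : (k.take b).length = b := List.length_take_of_le (by omega)
  rw [List.getD_eq_getElem?_getD, List.getElem?_append_left (by omega),
    ← List.getD_eq_getElem?_getD, List.getD_eq_getElem _ _ (by omega),
    List.getElem_take, List.getD_eq_getElem _ _ (by omega)]

theorem pv_E6 (a b n : Nat) (k : List Int) (hab : a < b) (hbn : b < n) (hn : n ≤ k.length) :
    (pvDropAt a (k.take n)).getD (b - 1) 0 = PySem.List.pyGetD k (b : Int) 0 := by
  rw [PySem.List.pyGetD_natCast, pv_dropAt_take a n k (by omega) hn]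
  have hla : (k.take a).length = a := List.length_take_of_le (by omega)
  have hlen2 : ((k.drop (a + 1)).take (n - (a + 1))).length = n - (a + 1) := by
    rw [List.length_take, List.length_drop]; omega
  rw [List.getD_eq_getElem?_getD, List.getElem?_append_right (by omega), hla,
    ← List.getD_eq_getElem?_getD, List.getD_eq_getElem _ _ (by omega),
    List.getElem_take, List.getElem_drop, List.getD_eq_getElem _ _ (by omega)]
  congr 1
  omega

theorem pv_E7 (i : Nat) (u : List Int) (h : i < u.length) :
    pvIns i (pvDropAt i u) (u.getD i 0) = u := by
  rw [pvIns, pvDropAt, List.take_append, List.drop_append]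
  have hl : (u.take i).length = i := List.length_take_of_le (by omega)
  rw [hl, List.take_take, min_self, Nat.sub_self, List.take_zero, List.append_nil,
    List.drop_eq_nil_of_le (by omega), List.nil_append, List.drop_zero,
    List.getD_eq_getElem _ _ h, ← List.drop_eq_getElem_cons h, List.take_append_drop]

-- keys of pmf's dict are (a subset of) first components of pmf
theorem pv_keys_mem {pmf : List (List Int × Int)} {key : List Int} (h : key ∈ pvKeys pmf) :
    ∃ kv ∈ pmf, kv.1 = key := by
  have h2 : (PySem.Dict.ofList pmf).keys = PySem.Set.ofList (pmf.map Prod.fst) := by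
    show (pmf.foldl (fun acc p => acc.insert p.1 p.2) PySem.Dict.empty).keys = _
    rw [PySem.Dict.keys_foldl_insert_key pmf Prod.fst (fun d x => x.2)]; rfl
  rw [pvKeys, h2, PySem.Set.mem_ofList, List.mem_map] at h
  obtain ⟨kv, hkv, rfl⟩ := h
  exact ⟨kv, hkv, rfl⟩

theorem pv_toFinset_mapI (l : List (List Int)) (f : List Int → Int) :
    (l.map f).toFinset = l.toFinset.image f := by
  ext x; simp

-- one fiber of the projection-set image has the cardinality of A's per-z value set
theorem pv_fiber_card (keys0 : List (List Int)) (i : Nat) (φ ζ : List Int → List Int)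
    (ψ : List Int → Int)
    (hproj : ∀ k ∈ keys0, pvDropAt i (φ k) = ζ k)
    (hval : ∀ k ∈ keys0, (φ k).getD i 0 = ψ k)
    (hilen : ∀ k ∈ keys0, i < (φ k).length) :
    ∀ z, (((keys0.toFinset.image φ).filter (fun u => pvDropAt i u = z)).card : Int)
        = (((keys0.toFinset.filter (fun k => ζ k = z)).image ψ).card : Int) := by
  intro z
  rw [Finset.filter_image]
  rw [show (keys0.toFinset.filter (fun k => pvDropAt i (φ k) = z))
      = keys0.toFinset.filter (fun k => ζ k = z) from
    Finset.filter_congr (fun k hk => by rw [hproj k (List.mem_toFinset.mp hk)])]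
  have hh := pv_card_image_proj (keys0.toFinset.filter (fun k => ζ k = z)) φ ψ i z
    (fun k hk => hval k (List.mem_toFinset.mp (Finset.mem_filter.mp hk).1))
    (fun k hk => by
      obtain ⟨hk1, hk2⟩ := Finset.mem_filter.mp hk
      have hkm := List.mem_toFinset.mp hk1
      rw [← hval k hkm, ← show ζ k = z from hk2, ← hproj k hkm]
      exact pv_E7 i (φ k) (hilen k hkm))
  exact_mod_cast hh

-- fiberwise decomposition of a projection-set cardinality
theorem pv_total_card (keys0 : List (List Int)) (i : Nat) (φ ζ : List Int → List Int)
    (hproj : ∀ k ∈ keys0, pvDropAt i (φ k) = ζ k) :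
    (keys0.toFinset.image φ).card
      = ∑ z ∈ keys0.toFinset.image ζ,
          ((keys0.toFinset.image φ).filter (fun u => pvDropAt i u = z)).card := by
  apply Finset.card_eq_sum_card_fiberwise
  intro u hu
  obtain ⟨k, hk, rfl⟩ := Finset.mem_image.mp hu
  rw [hproj k (List.mem_toFinset.mp hk)]
  exact Finset.mem_image_of_mem ζ hk

-- the per-pair equality: A's grouped DoF sum equals B's counting formula
theorem pv_dof_eq (pmf : List (List Int × Int)) (a b n : Nat) (hab : a < b) (hbn : b < n)
    (hlen : ∀ kv ∈ pmf, (n : Int) ≤ (kv.1.length : Int)) :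
    pvDofA pmf (n : Int) (a : Int) (b : Int)
      = pvDofB (PySem.Set.ofList ((pvKeys pmf).map
          (fun key => PySem.List.slice key none (some (n : Int))))) (a : Int) (b : Int) := by
  have hlen0 : ∀ k ∈ pvKeys pmf, n ≤ k.length := by
    intro k hk
    obtain ⟨kv, hkv, rfl⟩ := pv_keys_mem hk
    exact_mod_cast hlen kv hkv
  have hzpF : ∀ k ∈ pvKeys pmf, pvDropAt a (pvDropAt b (k.take n)) = pvFilterZ k (n : Int) (a : Int) (b : Int) :=
    fun k hk => pv_E2 a b n k hab hbn (hlen0 k hk)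
  have hzpG : ∀ k ∈ pvKeys pmf, pvDropAt (b - 1) (pvDropAt a (k.take n)) = pvFilterZ k (n : Int) (a : Int) (b : Int) :=
    fun k hk => pv_E4 a b n k hab hbn (hlen0 k hk)
  have hvalF : ∀ k ∈ pvKeys pmf, (pvDropAt b (k.take n)).getD a 0 = PySem.List.pyGetD k (a : Int) 0 :=
    fun k hk => pv_E5 a b n k hab hbn (hlen0 k hk)
  have hvalG : ∀ k ∈ pvKeys pmf, (pvDropAt a (k.take n)).getD (b - 1) 0 = PySem.List.pyGetD k (b : Int) 0 :=
    fun k hk => pv_E6 a b n k hab hbn (hlen0 k hk)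
  have hlenF : ∀ k ∈ pvKeys pmf, a < (pvDropAt b (k.take n)).length := by
    intro k hk
    have hkl := hlen0 k hk
    rw [pv_len_dropAt b _ (by rw [List.length_take]; omega), List.length_take]
    omega
  have hlenG : ∀ k ∈ pvKeys pmf, b - 1 < (pvDropAt a (k.take n)).length := by
    intro k hk
    have hkl := hlen0 k hk
    rw [pv_len_dropAt a _ (by rw [List.length_take]; omega), List.length_take]
    omega
  -- rewrite A's side into a Finset sum
  rw [pv_dofA_char pmf (n : Int) (a : Int) (b : Int),
    pv_foldl_sum _ (pv_nodup_ofList _), pv_toFinset_ofList, pv_toFinset_map]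
  -- unfold B's side and normalize its slices to pvDropAt/take
  simp only [pvDofB]
  have hcut : ∀ i : Nat, pvCut (i : Int) = pvDropAt i := fun i => funext (pv_cut_natCast i)
  rw [show ((b : Int) - 1) = ((b - 1 : Nat) : Int) by rw [Nat.cast_sub (by omega)]; simp]
  rw [hcut b, hcut a, hcut (b - 1)]
  rw [show (fun key : List Int => PySem.List.slice key none (some (n : Int)))
      = (fun k : List Int => k.take n) from funext (fun k => PySem.List.slice_to_natCast k n)]
  -- B's three projection sets as Finset images
  have hsxfin : (PySem.Set.ofList ((PySem.Set.ofList ((pvKeys pmf).map (fun k => k.take n))).map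
      (pvDropAt b))).toFinset = (pvKeys pmf).toFinset.image (fun k => pvDropAt b (k.take n)) := by
    rw [pv_toFinset_ofList, pv_toFinset_map, pv_toFinset_ofList, pv_toFinset_map,
      Finset.image_image]
    rfl
  have hsyfin : (PySem.Set.ofList ((PySem.Set.ofList ((pvKeys pmf).map (fun k => k.take n))).map
      (pvDropAt a))).toFinset = (pvKeys pmf).toFinset.image (fun k => pvDropAt a (k.take n)) := by
    rw [pv_toFinset_ofList, pv_toFinset_map, pv_toFinset_ofList, pv_toFinset_map,
      Finset.image_image]
    rfl
  have hszfin : (PySem.Set.ofList ((PySem.Set.ofList ((PySem.Set.ofList ((pvKeys pmf).map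
      (fun k => k.take n))).map (pvDropAt b))).map (pvDropAt a))).toFinset
      = (pvKeys pmf).toFinset.image (fun k => pvFilterZ k (n : Int) (a : Int) (b : Int)) := by
    rw [pv_toFinset_ofList, pv_toFinset_map, hsxfin, Finset.image_image]
    exact Finset.image_congr (fun k hk => hzpF k (by simpa using hk))
  -- B's sum over sz as a Finset sum over the same index set
  rw [pv_foldl_sum _ (pv_nodup_ofList _), hszfin]
  -- counters evaluate to fiber cardinalities = A's per-z value-set cardinalities
  have hcxv : ∀ z : List Int,
      (PySem.Dict.counter ((PySem.Set.ofList ((PySem.Set.ofList ((pvKeys pmf).map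
        (fun k => k.take n))).map (pvDropAt b))).map (pvDropAt a))).getD z 0
      = ((((pvKeys pmf).toFinset.filter (fun k => pvFilterZ k (n : Int) (a : Int) (b : Int) = z)).image
          (fun k => PySem.List.pyGetD k (a : Int) 0)).card : Int) := by
    intro z
    rw [PySem.Dict.getD_counter, pv_count_card _ (pv_nodup_ofList _) (pvDropAt a) z, hsxfin]
    exact pv_fiber_card (pvKeys pmf) a _ _ _ hzpF hvalF hlenF z
  have hcyv : ∀ z : List Int,
      (PySem.Dict.counter ((PySem.Set.ofList ((PySem.Set.ofList ((pvKeys pmf).map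
        (fun k => k.take n))).map (pvDropAt a))).map (pvDropAt (b - 1)))).getD z 0
      = ((((pvKeys pmf).toFinset.filter (fun k => pvFilterZ k (n : Int) (a : Int) (b : Int) = z)).image
          (fun k => PySem.List.pyGetD k (b : Int) 0)).card : Int) := by
    intro z
    rw [PySem.Dict.getD_counter, pv_count_card _ (pv_nodup_ofList _) (pvDropAt (b - 1)) z, hsyfin]
    exact pv_fiber_card (pvKeys pmf) (b - 1) _ _ _ hzpG hvalG hlenG z
  -- the three set sizes
  have hsxlen : ((PySem.Set.ofList ((PySem.Set.ofList ((pvKeys pmf).map (fun k => k.take n))).map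
      (pvDropAt b))).length : Int)
      = (((pvKeys pmf).toFinset.image (fun k => pvDropAt b (k.take n))).card : Int) := by
    rw [pv_len_ofList, ← pv_toFinset_ofList, hsxfin]
  have hsylen : ((PySem.Set.ofList ((PySem.Set.ofList ((pvKeys pmf).map (fun k => k.take n))).map
      (pvDropAt a))).length : Int)
      = (((pvKeys pmf).toFinset.image (fun k => pvDropAt a (k.take n))).card : Int) := by
    rw [pv_len_ofList, ← pv_toFinset_ofList, hsyfin]
  have hszlen : ((PySem.Set.ofList ((PySem.Set.ofList ((PySem.Set.ofList ((pvKeys pmf).map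
      (fun k => k.take n))).map (pvDropAt b))).map (pvDropAt a))).length : Int)
      = (((pvKeys pmf).toFinset.image (fun k => pvFilterZ k (n : Int) (a : Int) (b : Int))).card : Int) := by
    rw [pv_len_ofList, ← pv_toFinset_ofList, hszfin]
  rw [hsxlen, hsylen, hszlen]
  -- fiberwise decompositions of |Sx| and |Sy|
  have htotX : (((pvKeys pmf).toFinset.image (fun k => pvDropAt b (k.take n))).card : Int)
      = ∑ z ∈ (pvKeys pmf).toFinset.image (fun k => pvFilterZ k (n : Int) (a : Int) (b : Int)),
          ((((pvKeys pmf).toFinset.filter (fun k => pvFilterZ k (n : Int) (a : Int) (b : Int) = z)).image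
            (fun k => PySem.List.pyGetD k (a : Int) 0)).card : Int) := by
    rw [pv_total_card (pvKeys pmf) a _ _ hzpF]
    push_cast
    exact Finset.sum_congr rfl (fun z _ => pv_fiber_card (pvKeys pmf) a _ _ _ hzpF hvalF hlenF z)
  have htotY : (((pvKeys pmf).toFinset.image (fun k => pvDropAt a (k.take n))).card : Int)
      = ∑ z ∈ (pvKeys pmf).toFinset.image (fun k => pvFilterZ k (n : Int) (a : Int) (b : Int)),
          ((((pvKeys pmf).toFinset.filter (fun k => pvFilterZ k (n : Int) (a : Int) (b : Int) = z)).image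
            (fun k => PySem.List.pyGetD k (b : Int) 0)).card : Int) := by
    rw [pv_total_card (pvKeys pmf) (b - 1) _ _ hzpG]
    push_cast
    exact Finset.sum_congr rfl (fun z _ => pv_fiber_card (pvKeys pmf) (b - 1) _ _ _ hzpG hvalG hlenG z)
  rw [htotX, htotY]
  -- A's summand: set lengths are the same cardinalities
  have hXlen : ∀ z : List Int,
      ((PySem.Set.ofList (((pvKeys pmf).filter
          (fun k => pvFilterZ k (n : Int) (a : Int) (b : Int) == z)).map
          (fun k => PySem.List.pyGetD k (a : Int) 0))).length : Int)
      = ((((pvKeys pmf).toFinset.filter (fun k => pvFilterZ k (n : Int) (a : Int) (b : Int) = z)).image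
          (fun k => PySem.List.pyGetD k (a : Int) 0)).card : Int) := by
    intro z
    rw [pv_len_ofList, pv_toFinset_mapI,
      show ((pvKeys pmf).filter (fun k => pvFilterZ k (n : Int) (a : Int) (b : Int) == z)).toFinset
        = (pvKeys pmf).toFinset.filter (fun k => pvFilterZ k (n : Int) (a : Int) (b : Int) = z) by
          ext x; simp]
  have hYlen : ∀ z : List Int,
      ((PySem.Set.ofList (((pvKeys pmf).filter
          (fun k => pvFilterZ k (n : Int) (a : Int) (b : Int) == z)).map
          (fun k => PySem.List.pyGetD k (b : Int) 0))).length : Int)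
      = ((((pvKeys pmf).toFinset.filter (fun k => pvFilterZ k (n : Int) (a : Int) (b : Int) = z)).image
          (fun k => PySem.List.pyGetD k (b : Int) 0)).card : Int) := by
    intro z
    rw [pv_len_ofList, pv_toFinset_mapI,
      show ((pvKeys pmf).filter (fun k => pvFilterZ k (n : Int) (a : Int) (b : Int) == z)).toFinset
        = (pvKeys pmf).toFinset.filter (fun k => pvFilterZ k (n : Int) (a : Int) (b : Int) = z) by
          ext x; simp]
  -- final algebra
  simp only [hXlen, hYlen, hcxv, hcyv]
  rw [Finset.card_eq_sum_ones]
  push_cast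
  rw [← Finset.sum_sub_distrib, ← Finset.sum_sub_distrib, ← Finset.sum_add_distrib]
  exact Finset.sum_congr rfl (fun z _ => by ring)

-- ===== VERDICT (by name: the statement is the Claim_ definition above) =====
theorem calculate_pairwise_DoFs_spec : Claim_equal_calculate_pairwise_DoFs := by
  intro pmf keysize _ hpre
  unfold Spec_calculate_pairwise_DoFs
  simp only [calculate_pairwise_DoFs, calculate_pairwise_DoFs_alt]
  congr 1
  apply PySem.List.foldl_congr_mem
  intro pd ix hix
  apply PySem.List.foldl_congr_mem
  intro pd2 iy hiy
  rw [PySem.List.mem_pyRange_one] at hix hiy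
  obtain ⟨a, rfl⟩ : ∃ a : Nat, ix = (a : Int) :=
    ⟨ix.toNat, (Int.toNat_of_nonneg hix.1).symm⟩
  obtain ⟨b, rfl⟩ : ∃ b : Nat, iy = (b : Int) :=
    ⟨iy.toNat, (Int.toNat_of_nonneg (by omega)).symm⟩
  obtain ⟨n, rfl⟩ : ∃ n : Nat, keysize = (n : Int) :=
    ⟨keysize.toNat, (Int.toNat_of_nonneg (by omega)).symm⟩
  have hab : a < b := by
    have h1 := hiy.1
    omega
  have hbn : b < n := by exact_mod_cast hiy.2
  rw [pv_dof_eq pmf a b n hab hbn (hpre (by omega))]
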